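-- pv_equiv track=rewrite | github.com/LibreChat-AI/librechat-config-yaml | scripts/apipie.py | sort_models
-- ===== SOURCE A (Python) =====
-- def sort_models(ids):
--     """Simple sort with free models first."""
--     # Separate free models and others
--     free_models = sorted([id for id in ids if str(id).startswith('free/')])
--     other_models = sorted([id for id in ids if not str(id).startswith('free/')])
--
--     # Combine with a header for free models if they exist
--     result = []
--     if free_models:
--         result.append('---FREE---')
--         result.extend(free_models)
--     result.extend(other_models)
--
--     return result
-- ===== SOURCE B (Python) =====
-- def sort_models(ids):
--     """Simple sort with free models first: one keyed sort instead of two filtered sorts."""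
--     ordered = sorted(ids, key=lambda x: (not str(x).startswith('free/'), x))
--     if any(str(x).startswith('free/') for x in ids):
--         return ['---FREE---'] + ordered
--     return ordered
-- ===== Notes on version B (the rewrite author's own statement) =====
-- stated objective: simpler
-- what changed: Replaces the two comprehension-filtered sorts and the append/extend result assembly with a single sorted call over the whole list using a composite (not-free, id) key, plus an any() check to decide whether to prepend the header.
import Mathlib
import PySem

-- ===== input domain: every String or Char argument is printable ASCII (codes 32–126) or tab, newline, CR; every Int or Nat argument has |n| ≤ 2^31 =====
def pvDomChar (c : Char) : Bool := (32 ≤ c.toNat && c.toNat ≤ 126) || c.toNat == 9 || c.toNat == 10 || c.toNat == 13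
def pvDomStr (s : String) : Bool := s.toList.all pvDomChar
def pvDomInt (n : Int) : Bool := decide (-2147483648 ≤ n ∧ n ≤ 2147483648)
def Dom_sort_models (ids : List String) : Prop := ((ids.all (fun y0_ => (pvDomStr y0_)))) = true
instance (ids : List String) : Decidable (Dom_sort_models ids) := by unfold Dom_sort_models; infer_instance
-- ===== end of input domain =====

-- B replaces A's two filtered sorts and append/extend assembly by ONE sorted call with a
-- composite (not-free, id) key plus an any() check for the header (objective: simpler).

-- ===== PORT A =====
def sort_models (ids : List String) : List String :=
  let free_models := PySem.List.sorted (ids.filter (fun id => PySem.Str.startswith id "free/")) (fun x => x) false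
  let other_models := PySem.List.sorted (ids.filter (fun id => !PySem.Str.startswith id "free/")) (fun x => x) false
  let result : List String := []
  let result := if free_models = [] then result else (result ++ ["---FREE---"]) ++ free_models
  result ++ other_models

-- ===== PORT B =====
def sort_models_alt (ids : List String) : List String :=
  let ordered := PySem.List.sorted2 ids (fun x => !PySem.Str.startswith x "free/") (fun x => x) false
  if ids.any (fun x => PySem.Str.startswith x "free/") then ["---FREE---"] ++ ordered else ordered

-- ===== PRECONDITION & SPEC =====
def Spec_sort_models (ids : List String) (out : List String) : Prop := out = sort_models_alt ids
instance (ids : List String) (out : List String) : Decidable (Spec_sort_models ids out) := by unfold Spec_sort_models; infer_instance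

-- ===== CLAIM (what is proved, stated in full; the proofs are below) =====
def Claim_equal_sort_models : Prop := ∀ (ids : List String), Dom_sort_models ids → Spec_sort_models ids (sort_models ids)

-- ===== LEMMAS AND PROOFS =====

-- the composite key of B's sort, as a lexicographically ordered pair
def pvKey (p : String → Bool) (x : String) : Lex (Bool × String) := toLex (!p x, x)

theorem pvKey_injective (p : String → Bool) : Function.Injective (pvKey p) := by
  intro a b h
  exact congrArg (fun y => (ofLex y).2) h

-- sorted2 with keys (k1, k2) is sorted with the lexicographic pair key
theorem sorted2_eq_sorted_toLex (xs : List String) (p : String → Bool) :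
    PySem.List.sorted2 xs (fun x => !p x) (fun x => x) false
      = PySem.List.sorted xs (pvKey p) false := by
  show List.foldl _ [] xs = List.foldl _ [] xs
  have hb : (fun a b : String => decide ((!p a) < (!p b)) || !decide ((!p b) < (!p a)) && decide (a < b))
      = (fun a b : String => decide (pvKey p a < pvKey p b)) := by
    funext a b
    simp only [pvKey, Prod.Lex.lt_iff, ofLex_toLex]
    rcases lt_trichotomy (!p a) (!p b) with h | h | h
    · simp [h]
    · simp [h]
    · simp [h, ne_of_gt h]
  rw [hb]

-- B's single keyed sort equals A's two filtered sorts concatenated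
theorem sorted_key_eq_append (ids : List String) (p : String → Bool) :
    PySem.List.sorted ids (pvKey p) false
      = PySem.List.sorted (ids.filter p) (fun x => x) false
        ++ PySem.List.sorted (ids.filter (fun x => !p x)) (fun x => x) false := by
  apply PySem.List.eq_of_perm_of_pairwise_le_of_injective (pvKey p) (pvKey_injective p)
  · exact (PySem.List.sorted_perm ids (pvKey p) false).trans
      (((((PySem.List.sorted_perm (ids.filter p) _ false).append
          (PySem.List.sorted_perm (ids.filter (fun x => !p x)) _ false)).trans
        (List.filter_append_perm p ids))).symm)
  · exact PySem.List.sorted_pairwise ids (pvKey p)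
  · rw [List.pairwise_append]
    refine ⟨?_, ?_, ?_⟩
    · have hp := PySem.List.sorted_pairwise (ids.filter p) (fun x => x)
      refine hp.imp_of_mem ?_
      intro a b ha hb h
      have hpa : p a = true := ((List.mem_filter.mp ((PySem.List.mem_sorted _ _ _ _).mp ha))).2
      have hpb : p b = true := ((List.mem_filter.mp ((PySem.List.mem_sorted _ _ _ _).mp hb))).2
      rw [Prod.Lex.le_iff]
      right
      simp [pvKey, hpa, hpb, h]
    · have hp := PySem.List.sorted_pairwise (ids.filter (fun x => !p x)) (fun x => x)
      refine hp.imp_of_mem ?_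
      intro a b ha hb h
      have hpa : p a = false := by
        have := ((List.mem_filter.mp ((PySem.List.mem_sorted _ _ _ _).mp ha))).2
        simpa using this
      have hpb : p b = false := by
        have := ((List.mem_filter.mp ((PySem.List.mem_sorted _ _ _ _).mp hb))).2
        simpa using this
      rw [Prod.Lex.le_iff]
      right
      simp [pvKey, hpa, hpb, h]
    · intro a ha b hb
      have hpa : p a = true := ((List.mem_filter.mp ((PySem.List.mem_sorted _ _ _ _).mp ha))).2
      have hpb : p b = false := by
        have := ((List.mem_filter.mp ((PySem.List.mem_sorted _ _ _ _).mp hb))).2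
        simpa using this
      rw [Prod.Lex.le_iff]
      left
      simp [pvKey, hpa, hpb]

-- ===== VERDICT (by name: the statement is the Claim_ definition above) =====
theorem sort_models_spec : Claim_equal_sort_models := by
  intro ids _
  show sort_models ids = sort_models_alt ids
  unfold sort_models sort_models_alt
  rw [sorted2_eq_sorted_toLex ids (fun x => PySem.Str.startswith x "free/"),
      sorted_key_eq_append ids (fun x => PySem.Str.startswith x "free/")]
  by_cases hfree : ids.any (fun x => PySem.Str.startswith x "free/")
  · have hne : PySem.List.sorted (ids.filter (fun x => PySem.Str.startswith x "free/")) (fun x => x) false ≠ [] := by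
      rw [Ne, PySem.List.sorted_eq_nil_iff, List.filter_eq_nil_iff]
      rcases List.any_eq_true.mp hfree with ⟨x, hx, hpx⟩
      exact fun h => absurd hpx (by simpa using h x hx)
    simp at hfree hne
    simp [hfree, hne]
  · have hnil : PySem.List.sorted (ids.filter (fun x => PySem.Str.startswith x "free/")) (fun x => x) false = [] := by
      rw [PySem.List.sorted_eq_nil_iff, List.filter_eq_nil_iff]
      intro x hx
      simpa using (List.any_eq_false.mp (by simpa using hfree)) x hx
    simp at hfree hnil
    simp [hnil]
    exact hfree
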